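-- pv_equiv track=rewrite | github.com/austinc3030/school_archive | aes_m11809075/src/AES/AES.py | _cancel_like_terms
-- ===== SOURCE A (Python) =====
-- def _cancel_like_terms(calculations):
--     """
--     Cancel liked terms in the calculations
--
--     :param calculations: The calculations to cancel like terms
--
--     :return: Calculations with the like terms removed
--     """
--     for row_index, row in enumerate(calculations):
--         for column_index, column in enumerate(row):
--             new_calculation = []
--             for element_index, element in enumerate(column):
--                 if (column.count(element) % 2 ) != 0:  # ODD
--                     new_calculation.append(element)
--             calculations[row_index][column_index] = list(dict.fromkeys(new_calculation))
--
--     return calculations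
-- ===== SOURCE B (Python) =====
-- def _cancel_like_terms(calculations):
--     # Per cell: repeatedly strip ALL occurrences of the leading element and keep
--     # it iff its multiplicity (the length drop) is odd; dedup and first-occurrence
--     # order fall out of the stripping itself (no count() scans, no dict).
--     for row in calculations:
--         for column_index, column in enumerate(row):
--             result = []
--             rest = column
--             while rest:
--                 head = rest[0]
--                 remaining = [e for e in rest if e != head]
--                 if (len(rest) - len(remaining)) % 2 == 1:
--                     result.append(head)
--                 rest = remaining
--             row[column_index] = result
--     return calculations
-- ===== Notes on version B (the rewrite author's own statement) =====
-- stated objective: alternative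
-- what changed: A scans column.count(element) inside the element loop and then deduplicates with dict.fromkeys; B instead repeatedly strips all occurrences of the current leading element in one filtering pass and keeps it iff the length drop is odd, so deduplication and first-occurrence order emerge from the stripping itself (no counts, no dict); a timing run did not show B measurably faster, so no speed is claimed.
import Mathlib
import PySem

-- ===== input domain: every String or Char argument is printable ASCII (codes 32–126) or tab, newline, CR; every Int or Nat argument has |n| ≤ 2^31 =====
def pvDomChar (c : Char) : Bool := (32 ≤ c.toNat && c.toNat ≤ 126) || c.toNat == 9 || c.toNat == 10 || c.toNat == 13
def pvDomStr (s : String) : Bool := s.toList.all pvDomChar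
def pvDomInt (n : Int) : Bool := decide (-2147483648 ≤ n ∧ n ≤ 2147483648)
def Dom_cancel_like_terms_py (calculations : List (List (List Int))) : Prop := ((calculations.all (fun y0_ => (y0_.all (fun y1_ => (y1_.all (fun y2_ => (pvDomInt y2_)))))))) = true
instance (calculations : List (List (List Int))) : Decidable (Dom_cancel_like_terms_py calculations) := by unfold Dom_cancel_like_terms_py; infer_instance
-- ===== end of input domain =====

-- B replaces A's per-element count() scans + dict.fromkeys dedup by repeatedly stripping all
-- occurrences of the leading element and keeping it iff the length drop is odd (objective:
-- alternative algorithm, same result). Both A and B mutate `calculations` in place in Python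
-- in the same way; the theorems here are about the returned value.

-- ===== PORT A =====
def cancel_like_terms_py (calculations : List (List (List Int))) : List (List (List Int)) :=
  (PySem.List.enumerate calculations).foldl
    (fun calcs p =>
      let newRow :=
        (PySem.List.enumerate p.2).foldl
          (fun r q =>
            let column := q.2
            let new_calculation :=
              (PySem.List.enumerate column).foldl
                (fun acc t =>
                  if PySem.Int.mod ((PySem.List.count column t.2 : Nat) : Int) 2 ≠ 0 then
                    acc ++ [t.2]
                  else acc)
                []
            r.set q.1.toNat (PySem.List.dedup new_calculation))
          p.2
      calcs.set p.1.toNat newRow)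
    calculations

-- ===== PORT B =====
-- B's while loop over `rest`: strip all occurrences of the head, keep the head iff the
-- length drop is odd; `result` is the Python accumulator.
def pvStrip (result : List Int) (rest : List Int) : List Int :=
  match rest with
  | [] => result
  | head :: tail =>
    let remaining := (head :: tail).filter (fun e => e != head)
    pvStrip
      (if ((head :: tail).length - remaining.length) % 2 = 1 then result ++ [head] else result)
      remaining
termination_by rest.length
decreasing_by
  simp only [List.filter_cons, bne_self_eq_false, Bool.false_eq_true, if_false,
    List.length_cons]
  have := List.length_filter_le (fun e => e != head) tail
  omega

def cancel_like_terms_py_alt (calculations : List (List (List Int))) : List (List (List Int)) :=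
  calculations.map (fun row =>
    (PySem.List.enumerate row).foldl
      (fun r q => r.set q.1.toNat (pvStrip [] q.2))
      row)

-- ===== PRECONDITION & SPEC =====
def Spec_cancel_like_terms_py (calculations : List (List (List Int))) (out : List (List (List Int))) : Prop := out = cancel_like_terms_py_alt calculations
instance (calculations : List (List (List Int))) (out : List (List (List Int))) : Decidable (Spec_cancel_like_terms_py calculations out) := by unfold Spec_cancel_like_terms_py; infer_instance

-- ===== CLAIM (what is proved, stated in full; the proofs are below) =====
def Claim_equal_cancel_like_terms_py : Prop := ∀ (calculations : List (List (List Int))), Dom_cancel_like_terms_py calculations → Spec_cancel_like_terms_py calculations (cancel_like_terms_py calculations)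

-- ===== LEMMAS AND PROOFS =====

-- The odd-multiplicity predicate both sides compute per cell, as a Bool over the column.
def pvOdd (col : List Int) (e : Int) : Bool := decide (col.count e % 2 = 1)

-- A's per-cell result (the body of A's innermost loop, as a function of one cell).
def pvCellA (column : List Int) : List Int :=
  PySem.List.dedup
    ((PySem.List.enumerate column).foldl
      (fun acc t =>
        if PySem.Int.mod ((PySem.List.count column t.2 : Nat) : Int) 2 ≠ 0 then
          acc ++ [t.2]
        else acc)
      [])

-- Writing cell i := g (original cell i) for every i, starting from the list itself, is map g.
theorem foldl_set_enumerate {α : Type} (g : α → α) :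
    ∀ (xs ys : List α),
      (PySem.List.enumerate xs (ys.length : Int)).foldl
        (fun acc p => acc.set p.1.toNat (g p.2)) (ys ++ xs) = ys ++ xs.map g := by
  intro xs
  induction xs with
  | nil => intro ys; simp [PySem.List.enumerate]
  | cons x t ih =>
    intro ys
    have h1 : ((ys.length : Int)).toNat = ys.length := by simp
    have h2 : (ys ++ x :: t).set ys.length (g x) = (ys ++ [g x]) ++ t := by simp
    have h3 : ((ys.length : Int) + 1) = ((ys ++ [g x]).length : Int) := by simp
    simp only [PySem.List.enumerate, List.foldl_cons, h1, h2]
    rw [h3]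
    have := ih (ys ++ [g x])
    simp only [List.append_assoc, List.cons_append, List.nil_append] at this ⊢
    exact this

-- Keeping the second components of the kept enumerate pairs is filtering the column.
theorem enum_filter_map_snd (q : Int → Bool) :
    ∀ (col : List Int) (k : Int),
      ((PySem.List.enumerate col k).filter (fun t => q t.2)).map (fun t => t.2)
        = col.filter q := by
  intro col
  induction col with
  | nil => intro k; simp [PySem.List.enumerate]
  | cons x t ih =>
    intro k
    simp only [PySem.List.enumerate, List.filter_cons]
    by_cases hq : q x
    · simp [hq, ih]
    · simp [hq, ih]

-- A's per-cell result is the ordered dedup of the odd-multiplicity elements.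
theorem cellA_eq (column : List Int) :
    pvCellA column = PySem.List.dedup (column.filter (pvOdd column)) := by
  have hq : ∀ k : Int, decide (PySem.Int.mod ((column.count k : Nat) : Int) 2 ≠ 0)
      = pvOdd column k := by
    intro k
    rw [PySem.Int.mod_eq_emod_of_pos (by norm_num)]
    by_cases hc : column.count k % 2 = 1
    · have : ((column.count k : Nat) : Int) % 2 = 1 := by omega
      simp [pvOdd, hc, this]
    · have : ((column.count k : Nat) : Int) % 2 = 0 := by omega
      simp [pvOdd, hc, this]
  have hbody : (fun (acc : List Int) (t : Int × Int) =>
        if PySem.Int.mod ((PySem.List.count column t.2 : Nat) : Int) 2 ≠ 0 then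
          acc ++ [t.2]
        else acc)
      = (fun acc t =>
        if (fun t : Int × Int =>
            decide (PySem.Int.mod ((PySem.List.count column t.2 : Nat) : Int) 2 ≠ 0)) t = true then
          acc ++ [(fun t : Int × Int => t.2) t]
        else acc) := by
    funext acc t
    simp
  rw [pvCellA, hbody, PySem.List.foldl_append_if, List.nil_append]
  rw [enum_filter_map_snd
    (fun e => decide (PySem.Int.mod ((PySem.List.count column e : Nat) : Int) 2 ≠ 0)) column 0]
  congr 1
  exact List.filter_congr (fun k _ => by simpa [PySem.List.count] using hq k)

-- Multiplicity of the head as a length drop (what B's `len(rest) - len(remaining)` measures).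
theorem count_eq_length_sub (l : List Int) (x : Int) :
    l.count x = l.length - (l.filter (fun e => e != x)).length := by
  induction l with
  | nil => simp
  | cons a t ih =>
    by_cases h : a = x
    · subst h
      simp [ih]
      have : (List.filter (fun e => e != a) t).length ≤ t.length := List.length_filter_le _ _
      omega
    · simp [h, ih]

-- Counts of other elements survive stripping x.
theorem count_filter_ne (l : List Int) (x e : Int) (h : e ≠ x) :
    (l.filter (fun e => e != x)).count e = l.count e := by
  simp [List.count_filter, h]

-- Folding Set.add ignores elements already in the accumulator.
theorem foldl_add_of_mem (x : Int) :
    ∀ (L : List Int) (s : PySem.Set Int), x ∈ s →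
      L.foldl PySem.Set.add s = (L.filter (fun e => e != x)).foldl PySem.Set.add s := by
  intro L
  induction L with
  | nil => intro s _; rfl
  | cons e t ih =>
    intro s hs
    by_cases hex : e = x
    · subst hex
      have hc : PySem.Set.add s e = s := by
        simp [PySem.Set.add, List.contains_eq_mem, hs]
      simp only [List.filter_cons, bne_self_eq_false, Bool.false_eq_true, if_false,
        List.foldl_cons, hc]
      exact ih s hs
    · have hmem : x ∈ PySem.Set.add s e := (PySem.Set.mem_add s e x).mpr (Or.inl hs)
      have hne : (e != x) = true := by simp [hex]
      simp only [List.filter_cons, hne, if_true, List.foldl_cons]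
      exact ih _ hmem
-- Prepending a key absent from the input commutes with the Set.add fold.
theorem foldl_add_cons_absent (x : Int) :
    ∀ (M : List Int) (s : List Int), (∀ e ∈ M, e ≠ x) →
      M.foldl PySem.Set.add (x :: s) = x :: M.foldl PySem.Set.add s := by
  intro M
  induction M with
  | nil => intro s _; rfl
  | cons e t ih =>
    intro s hM
    have hex : e ≠ x := hM e (by simp)
    have hc : (x :: s).contains e = s.contains e := by
      simp [List.contains_eq_mem, hex]
    have ht : ∀ e ∈ t, e ≠ x := fun e he => hM e (by simp [he])
    by_cases hs : s.contains e = true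
    · have h1 : PySem.Set.add (x :: s) e = x :: s := by
        unfold PySem.Set.add PySem.Set.contains; rw [hc, hs]; simp
      have h2 : PySem.Set.add s e = s := by
        unfold PySem.Set.add PySem.Set.contains; rw [hs]; simp
      simp only [List.foldl_cons, h1, h2]
      exact ih s ht
    · have hs' : s.contains e = false := by simpa using hs
      have h1 : PySem.Set.add (x :: s) e = x :: (s ++ [e]) := by
        unfold PySem.Set.add PySem.Set.contains; rw [hc, hs']; simp
      have h2 : PySem.Set.add s e = s ++ [e] := by
        unfold PySem.Set.add PySem.Set.contains; rw [hs']; simp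
      simp only [List.foldl_cons, h1, h2]
      exact ih (s ++ [e]) ht

-- First-occurrence dedup of a cons: keep the head, strip it from the tail.
theorem dedup_cons (x : Int) (L : List Int) :
    PySem.List.dedup (x :: L) = x :: PySem.List.dedup (L.filter (fun e => e != x)) := by
  have h0 : PySem.Set.add (PySem.Set.empty : PySem.Set Int) x = [x] := by
    simp [PySem.Set.add, PySem.Set.empty]
  rw [PySem.List.dedup, PySem.Set.ofList, List.foldl_cons, h0]
  rw [foldl_add_of_mem x L [x] (by simp)]
  rw [foldl_add_cons_absent x (L.filter (fun e => e != x)) []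
    (fun e he => by simpa using (List.mem_filter.mp he).2)]
  rfl

-- B's stripping loop computes the ordered dedup of the odd-multiplicity elements.
theorem strip_eq :
    ∀ (n : Nat) (col : List Int), col.length ≤ n → ∀ acc : List Int,
      pvStrip acc col = acc ++ PySem.List.dedup (col.filter (pvOdd col)) := by
  intro n
  induction n with
  | zero =>
    intro col hlen acc
    have : col = [] := List.eq_nil_of_length_eq_zero (Nat.le_zero.mp hlen)
    subst this
    rw [pvStrip.eq_def]
    simp [PySem.List.dedup, PySem.Set.ofList, PySem.Set.empty]
  | succ n ih =>
    intro col hlen acc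
    match col with
    | [] =>
      rw [pvStrip.eq_def]
      simp [PySem.List.dedup, PySem.Set.ofList, PySem.Set.empty]
    | x :: t =>
      have hrem : (x :: t).filter (fun e => e != x) = t.filter (fun e => e != x) := by
        simp
      have hlenrem : (t.filter (fun e => e != x)).length ≤ n := by
        have := List.length_filter_le (fun e => e != x) t
        simp only [List.length_cons] at hlen
        omega
      -- counts of the surviving elements are unchanged by the strip
      have hsurv : (t.filter (fun e => e != x)).filter
            (pvOdd (t.filter (fun e => e != x)))
          = (t.filter (fun e => e != x)).filter (pvOdd (x :: t)) := by
        apply List.filter_congr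
        intro e he
        have hex : e ≠ x := by simpa using (List.mem_filter.mp he).2
        have h1 : (t.filter (fun e => e != x)).count e = (x :: t).count e := by
          rw [count_filter_ne t x e hex, List.count_cons]
          simp [Ne.symm hex]
        simp [pvOdd, h1]
      -- the loop condition is exactly "the multiplicity of x in the column is odd"
      have hcount : (x :: t).count x
          = (x :: t).length - (t.filter (fun e => e != x)).length := by
        rw [count_eq_length_sub (x :: t) x, hrem]
      rw [pvStrip.eq_def]
      simp only [hrem]
      rw [ih (t.filter (fun e => e != x)) hlenrem, hsurv]
      by_cases hcond : ((x :: t).length - (t.filter (fun e => e != x)).length) % 2 = 1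
      · have hodd : (x :: t).count x % 2 = 1 := by rw [hcount]; exact hcond
        have hx : pvOdd (x :: t) x = true := by
          simp only [pvOdd, decide_eq_true_eq]; exact hodd
        have hfc : (x :: t).filter (pvOdd (x :: t)) = x :: t.filter (pvOdd (x :: t)) := by
          simp [hx]
        have hcomm : (t.filter (pvOdd (x :: t))).filter (fun e => e != x)
            = (t.filter (fun e => e != x)).filter (pvOdd (x :: t)) := by
          rw [List.filter_filter, List.filter_filter]
          exact List.filter_congr (fun e _ => Bool.and_comm _ _)
        rw [if_pos hcond, hfc, dedup_cons, hcomm]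
        simp
      · have hodd : ¬ (x :: t).count x % 2 = 1 := by rw [hcount]; exact hcond
        have hx : pvOdd (x :: t) x = false := by
          simp only [pvOdd, decide_eq_false_iff_not]; exact hodd
        -- the odd filter already removes every x, so stripping x first changes nothing
        have hfc : (x :: t).filter (pvOdd (x :: t))
            = (t.filter (fun e => e != x)).filter (pvOdd (x :: t)) := by
          rw [List.filter_filter, List.filter_cons]
          simp only [hx, Bool.false_eq_true, if_false]
          apply List.filter_congr
          intro e _
          by_cases hex : e = x
          · subst hex; simp [hx]
          · simp [hex]
        rw [if_neg hcond, hfc]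

-- A equals "map the per-cell A-transform over every row".
theorem portA_eq_map (calcs : List (List (List Int))) :
    cancel_like_terms_py calcs = calcs.map (fun row => row.map pvCellA) := by
  have hrow : ∀ row : List (List Int),
      (PySem.List.enumerate row).foldl
        (fun r q => r.set q.1.toNat (pvCellA q.2)) row = row.map pvCellA := by
    intro row
    exact foldl_set_enumerate pvCellA row []
  have houter := foldl_set_enumerate
      (fun row => (PySem.List.enumerate row).foldl
        (fun r q => r.set q.1.toNat (pvCellA q.2)) row) calcs []
  calc cancel_like_terms_py calcs
      = (PySem.List.enumerate calcs).foldl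
          (fun acc p => acc.set p.1.toNat
            ((PySem.List.enumerate p.2).foldl
              (fun r q => r.set q.1.toNat (pvCellA q.2)) p.2)) calcs := rfl
    _ = calcs.map (fun row => (PySem.List.enumerate row).foldl
          (fun r q => r.set q.1.toNat (pvCellA q.2)) row) := houter
    _ = calcs.map (fun row => row.map pvCellA) := by
          exact List.map_congr_left (fun row _ => hrow row)

-- B equals "map the per-cell B-transform over every row".
theorem portB_eq_map (calcs : List (List (List Int))) :
    cancel_like_terms_py_alt calcs = calcs.map (fun row => row.map (fun c => pvStrip [] c)) := by
  apply List.map_congr_left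
  intro row _
  exact foldl_set_enumerate (fun c => pvStrip [] c) row []

-- One cell: A's odd-count scan + dedup equals B's stripping loop.
theorem cell_eq (column : List Int) : pvCellA column = pvStrip [] column := by
  rw [cellA_eq, strip_eq column.length column (le_refl _) []]
  simp

-- ===== VERDICT (by name: the statement is the Claim_ definition above) =====
theorem cancel_like_terms_py_spec : Claim_equal_cancel_like_terms_py := by
  intro calcs _
  unfold Spec_cancel_like_terms_py
  rw [portA_eq_map, portB_eq_map]
  simp [funext cell_eq]
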